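-- pv_equiv track=rewrite | github.com/emmanestallo/eee121 | SP2023.py | find_parallel
-- ===== SOURCE A (Python) =====
-- def find_pairwise(arr,storage):
--     for i in range(len(arr)):
--         for j in range(i+1,len(arr)):
--             storage.append([arr[i],arr[j]])
--             storage.append([arr[j],arr[i]])
--     return
--
-- def find_parallel(graph):
--     visited = set() # contains the nodes of visited resistors
--     parallelCombinations = []
--
--     for resistor in graph:
--         current_resistors = []
--         if resistor not in visited:
--             to_visit = set([graph[resistor][0],graph[resistor][1]]) #check the nodes of the current resistor
--             current_resistors.append(resistor)
--             visited.add(resistor)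
--
--             for resName in graph:
--                 if resName not in current_resistors and resName not in visited:
--                     node1, node2 = graph[resName][0], graph[resName][1]
--                     if to_visit == set([node1,node2]):
--                         current_resistors.append(resName)
--                         visited.add(resName)
--         find_pairwise(current_resistors,parallelCombinations)
--
--     return parallelCombinations
-- ===== SOURCE B (Python) =====
-- def find_parallel(graph):
--     # hash-group resistors by their (unordered) node pair, then emit ordered pairs per group
--     keyed = []
--     for name, nodes in graph.items():
--         a, b = nodes[0], nodes[1]
--         keyed.append(((min(a, b), max(a, b)), name))
--     buckets = {}
--     for key, name in keyed:
--         buckets.setdefault(key, []).append(name)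
--     out = []
--     for group in buckets.values():
--         for i, x in enumerate(group):
--             for y in group[i + 1:]:
--                 out.append([x, y])
--                 out.append([y, x])
--     return out
-- ===== Notes on version B (the rewrite author's own statement) =====
-- stated objective: faster
-- what changed: B groups resistors in one pass with a dict keyed by the normalised (min,max) node pair instead of A's per-leader rescan of the whole dict with a visited set, then emits each bucket's ordered pairs.
import Mathlib
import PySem

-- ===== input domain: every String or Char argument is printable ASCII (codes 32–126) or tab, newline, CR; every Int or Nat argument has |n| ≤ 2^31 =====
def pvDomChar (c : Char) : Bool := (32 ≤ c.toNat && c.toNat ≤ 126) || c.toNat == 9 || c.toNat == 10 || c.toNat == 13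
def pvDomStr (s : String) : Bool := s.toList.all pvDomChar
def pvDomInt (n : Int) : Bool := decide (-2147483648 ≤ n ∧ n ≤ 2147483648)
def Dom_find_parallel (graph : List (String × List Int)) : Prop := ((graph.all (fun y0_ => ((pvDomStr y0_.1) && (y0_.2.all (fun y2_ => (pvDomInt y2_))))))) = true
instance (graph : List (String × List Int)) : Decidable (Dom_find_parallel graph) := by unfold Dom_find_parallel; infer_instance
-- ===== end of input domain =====

-- B replaces A's quadratic visited-set rescan by a single hash-grouping pass over the dict (measured faster).

-- ===== PORT A =====
-- find_pairwise(arr, storage): appends both orderings of every index pair i < j to storage.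
def pyFindPairwise (arr : List String) (storage : List (List String)) : List (List String) :=
  (PySem.List.pyRange 0 arr.length 1).foldl (fun st i =>
    (PySem.List.pyRange (i + 1) arr.length 1).foldl (fun st2 j =>
      st2 ++ [[PySem.List.pyGetD arr i "", PySem.List.pyGetD arr j ""]]
          ++ [[PySem.List.pyGetD arr j "", PySem.List.pyGetD arr i ""]]) st) storage

def find_parallel (graph : List (String × List Int)) : List (List String) :=
  let d : PySem.Dict String (List Int) := PySem.Dict.ofList graph
  let final := d.keys.foldl (fun (st : PySem.Set String × List (List String)) resistor =>
    if !(PySem.Set.contains st.1 resistor) then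
      let nodes := d.getD resistor []
      let to_visit : PySem.Set Int :=
        PySem.Set.ofList [PySem.List.pyGetD nodes 0 0, PySem.List.pyGetD nodes 1 0]
      let cur : List String := [] ++ [resistor]
      let visited1 := PySem.Set.add st.1 resistor
      let inner := d.keys.foldl (fun (p : List String × PySem.Set String) resName =>
        if !(p.1.contains resName) && !(PySem.Set.contains p.2 resName) then
          let ns := d.getD resName []
          let node1 := PySem.List.pyGetD ns 0 0
          let node2 := PySem.List.pyGetD ns 1 0
          if PySem.Set.equal to_visit (PySem.Set.ofList [node1, node2]) then
            (p.1 ++ [resName], PySem.Set.add p.2 resName)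
          else p
        else p) (cur, visited1)
      (inner.2, pyFindPairwise inner.1 st.2)
    else (st.1, pyFindPairwise [] st.2)) (PySem.Set.empty, [])
  final.2

-- ===== PORT B =====
def find_parallel_alt (graph : List (String × List Int)) : List (List String) :=
  let d : PySem.Dict String (List Int) := PySem.Dict.ofList graph
  let keyed : List ((Int × Int) × String) := d.items.foldl (fun acc p =>
    let a := PySem.List.pyGetD p.2 0 0
    let b := PySem.List.pyGetD p.2 1 0
    acc ++ [((min a b, max a b), p.1)]) []
  let buckets : PySem.Dict (Int × Int) (List String) :=
    keyed.foldl (fun bk q => bk.modify q.1 [] (· ++ [q.2])) PySem.Dict.empty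
  buckets.values.foldl (fun out group =>
    (PySem.List.enumerate group).foldl (fun out2 ix =>
      (PySem.List.slice group (some (ix.1 + 1)) none).foldl (fun out3 y =>
        out3 ++ [[ix.2, y]] ++ [[y, ix.2]]) out2) out) []

-- ===== PRECONDITION & SPEC =====
-- Pre_ excludes exactly the inputs on which the Python A raises IndexError: a resistor whose
-- node list (as the value surviving in the dict) has fewer than two entries.
def Pre_find_parallel (graph : List (String × List Int)) : Prop :=
  ∀ p ∈ (PySem.Dict.ofList graph : PySem.Dict String (List Int)).items, 2 ≤ p.2.length
instance (graph : List (String × List Int)) : Decidable (Pre_find_parallel graph) := by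
  unfold Pre_find_parallel; infer_instance

def pvWitness_find_parallel : (List (String × List Int)) :=
  [("R1", [1, 2]), ("R2", [2, 1]), ("R3", [2, 3])]

def Spec_find_parallel (graph : List (String × List Int)) (out : List (List String)) : Prop := out = find_parallel_alt graph
instance (graph : List (String × List Int)) (out : List (List String)) : Decidable (Spec_find_parallel graph out) := by unfold Spec_find_parallel; infer_instance

-- ===== CLAIM (what is proved, stated in full; the proofs are below) =====
def Claim_equal_find_parallel : Prop := ∀ (graph : List (String × List Int)), Dom_find_parallel graph → Pre_find_parallel graph → Spec_find_parallel graph (find_parallel graph)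

-- ===== LEMMAS AND PROOFS =====

-- the unordered node pair of a resistor, normalised as (min, max)
def keyOf (v : List Int) : Int × Int :=
  (min (PySem.List.pyGetD v 0 0) (PySem.List.pyGetD v 1 0),
   max (PySem.List.pyGetD v 0 0) (PySem.List.pyGetD v 1 0))

def Kfun (d : PySem.Dict String (List Int)) (s : String) : Int × Int := keyOf (d.getD s [])

-- both orderings of every pair drawn from a group, in A's (= B's) emission order
def pairsSpec : List String → List (List String)
  | [] => []
  | x :: t => (t.flatMap fun y => [[x, y], [y, x]]) ++ pairsSpec t

-- the common normal form of both programs: group the dict's resistors by normalised node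
-- pair (keys in first-occurrence order) and emit each group's ordered pairs
def specR (d : PySem.Dict String (List Int)) : List (List String) :=
  (PySem.List.dedup (d.items.map (fun p => keyOf p.2))).flatMap
    (fun k => pairsSpec ((d.items.filter (fun p => keyOf p.2 == k)).map (·.1)))

-- A's loop bodies, named (definitionally equal to the lambdas inside find_parallel)
def innerStep (d : PySem.Dict String (List Int)) (tv : PySem.Set Int) :
    List String × PySem.Set String → String → List String × PySem.Set String :=
  fun p resName =>
    if !(p.1.contains resName) && !(PySem.Set.contains p.2 resName) then
      if PySem.Set.equal tv (PySem.Set.ofList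
          [PySem.List.pyGetD (d.getD resName []) 0 0,
           PySem.List.pyGetD (d.getD resName []) 1 0]) then
        (p.1 ++ [resName], PySem.Set.add p.2 resName)
      else p
    else p

def tvOf (d : PySem.Dict String (List Int)) (r : String) : PySem.Set Int :=
  PySem.Set.ofList
    [PySem.List.pyGetD (d.getD r []) 0 0, PySem.List.pyGetD (d.getD r []) 1 0]

def outerStep (d : PySem.Dict String (List Int)) :
    PySem.Set String × List (List String) → String → PySem.Set String × List (List String) :=
  fun st resistor =>
    if !(PySem.Set.contains st.1 resistor) then
      let inner := d.keys.foldl (innerStep d (tvOf d resistor))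
        ([] ++ [resistor], PySem.Set.add st.1 resistor)
      (inner.2, pyFindPairwise inner.1 st.2)
    else (st.1, pyFindPairwise [] st.2)

theorem pfw_inner (arr : List String) (x : String) :
    ∀ (u : List String) (j : Nat) (st : List (List String)), arr.drop j = u →
    (PySem.List.pyRange (j : Int) arr.length 1).foldl
      (fun st2 jj => st2 ++ [[x, PySem.List.pyGetD arr jj ""]] ++ [[PySem.List.pyGetD arr jj "", x]]) st
    = st ++ u.flatMap (fun y => [[x, y], [y, x]]) := by
  intro u
  induction u with
  | nil =>
    intro j st h
    rw [PySem.List.pyRange_one_eq_nil (by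
      have := List.drop_eq_nil_iff.mp h; exact_mod_cast this)]
    simp
  | cons y u' ih =>
    intro j st h
    have hj : j < arr.length := by
      by_contra hle
      rw [List.drop_eq_nil_of_le (by omega)] at h; simp at h
    have hget : arr[j]? = some y := by
      have : (arr.drop j)[0]? = some y := by rw [h]; rfl
      simpa using this
    rw [PySem.List.pyRange_one_cons (by exact_mod_cast hj)]
    simp only [List.foldl_cons]
    rw [PySem.List.pyGetD_natCast]
    have hgd : arr.getD j "" = y := by simp [List.getD, hget]
    have hdrop : arr.drop (j + 1) = u' := by
      rw [← List.drop_drop (i := 1) (j := j), h]; rfl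
    have := ih (j + 1) (st ++ [[x, y]] ++ [[y, x]]) hdrop
    push_cast at this
    rw [hgd, this]
    simp

theorem pfw_outer (arr : List String) :
    ∀ (t : List String) (k : Nat) (st : List (List String)), arr.drop k = t →
    (PySem.List.pyRange (k : Int) arr.length 1).foldl (fun st i =>
      (PySem.List.pyRange (i + 1) arr.length 1).foldl (fun st2 j =>
        st2 ++ [[PySem.List.pyGetD arr i "", PySem.List.pyGetD arr j ""]]
            ++ [[PySem.List.pyGetD arr j "", PySem.List.pyGetD arr i ""]]) st) st
    = st ++ pairsSpec t := by
  intro t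
  induction t with
  | nil =>
    intro k st h
    rw [PySem.List.pyRange_one_eq_nil (by
      have := List.drop_eq_nil_iff.mp h; exact_mod_cast this)]
    simp [pairsSpec]
  | cons x t' ih =>
    intro k st h
    have hk : k < arr.length := by
      by_contra hle
      rw [List.drop_eq_nil_of_le (by omega)] at h; simp at h
    have hget : arr[k]? = some x := by
      have : (arr.drop k)[0]? = some x := by rw [h]; rfl
      simpa using this
    have hdrop : arr.drop (k + 1) = t' := by
      rw [← List.drop_drop (i := 1) (j := k), h]; rfl
    rw [PySem.List.pyRange_one_cons (by exact_mod_cast hk)]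
    simp only [List.foldl_cons]
    rw [PySem.List.pyGetD_natCast]
    have hgd : arr.getD k "" = x := by simp [List.getD, hget]
    rw [hgd]
    have hinner := pfw_inner arr x t' (k + 1) st hdrop
    push_cast at hinner
    rw [hinner]
    have := ih (k + 1) (st ++ t'.flatMap (fun y => [[x, y], [y, x]])) hdrop
    push_cast at this
    rw [this]
    simp [pairsSpec]

theorem pyFindPairwise_eq (arr : List String) (st : List (List String)) :
    pyFindPairwise arr st = st ++ pairsSpec arr := by
  have := pfw_outer arr arr 0 st (by simp)
  simpa [pyFindPairwise] using this

theorem set2_eq (a b c d : Int) :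
    PySem.Set.equal (PySem.Set.ofList [a, b]) (PySem.Set.ofList [c, d]) = true ↔
    (min a b, max a b) = (min c d, max c d) := by
  rw [PySem.Set.equal_iff]
  simp only [PySem.Set.mem_ofList, List.mem_cons, List.not_mem_nil, or_false]
  constructor
  · intro h
    have ha := (h a).mp (Or.inl rfl)
    have hb := (h b).mp (Or.inr rfl)
    have hc := (h c).mpr (Or.inl rfl)
    have hd := (h d).mpr (Or.inr rfl)
    simp only [Prod.mk.injEq]
    rcases ha with h1 | h1 <;> rcases hb with h2 | h2 <;> rcases hc with h3 | h3 <;>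
      rcases hd with h4 | h4 <;> constructor <;> omega
  · intro h x
    simp only [Prod.mk.injEq] at h
    obtain ⟨h1, h2⟩ := h
    constructor <;> rintro (rfl | rfl) <;> omega

theorem inner_scan (d : PySem.Dict String (List Int)) (tv : PySem.Set Int) (kr : Int × Int)
    (htv : ∀ s : String,
      PySem.Set.equal tv (PySem.Set.ofList
        [PySem.List.pyGetD (d.getD s []) 0 0, PySem.List.pyGetD (d.getD s []) 1 0]) = true
      ↔ Kfun d s = kr) :
    ∀ (l : List String), l.Nodup → ∀ (cur : List String) (vis : PySem.Set String),
    (∀ u ∈ cur, u ∈ vis) →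
    (l.foldl (innerStep d tv) (cur, vis)).1
      = cur ++ l.filter (fun s => !(PySem.Set.contains vis s) && decide (Kfun d s = kr)) ∧
    ∀ t, t ∈ (l.foldl (innerStep d tv) (cur, vis)).2
      ↔ t ∈ vis ∨ (t ∈ l ∧ Kfun d t = kr) := by
  intro l
  induction l with
  | nil => intro _ cur vis hc; simp
  | cons s rest ih =>
    intro hnd cur vis hc
    have hnd' : rest.Nodup := (List.nodup_cons.mp hnd).2
    have hs : s ∉ rest := (List.nodup_cons.mp hnd).1
    simp only [List.foldl_cons, List.filter_cons, innerStep]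
    by_cases hv : s ∈ vis
    · have hcond : (!(cur.contains s) && !(PySem.Set.contains vis s)) = false := by
        simp [hv]
      rw [hcond]
      simp only [Bool.false_eq_true, if_false]
      have hpred : (!(PySem.Set.contains vis s) && decide (Kfun d s = kr)) = false := by
        simp [hv]
      rw [hpred]
      obtain ⟨h1, h2⟩ := ih hnd' cur vis hc
      refine ⟨by simpa using h1, fun t => ?_⟩
      rw [h2 t]
      constructor
      · rintro (h | ⟨h, hk⟩)
        · exact Or.inl h
        · exact Or.inr ⟨List.mem_cons_of_mem _ h, hk⟩
      · rintro (h | ⟨h, hk⟩)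
        · exact Or.inl h
        · rcases List.mem_cons.mp h with rfl | h
          · exact Or.inl hv
          · exact Or.inr ⟨h, hk⟩
    · have hcu : s ∉ cur := fun h => hv (hc s h)
      have hcond : (!(cur.contains s) && !(PySem.Set.contains vis s)) = true := by
        simp [hv, hcu]
      rw [hcond]
      simp only [if_true]
      by_cases hkey : Kfun d s = kr
      · rw [if_pos ((htv s).mpr hkey)]
        have hpred : (!(PySem.Set.contains vis s) && decide (Kfun d s = kr)) = true := by
          simp [hv, hkey]
        rw [hpred]
        obtain ⟨h1, h2⟩ := ih hnd' (cur ++ [s]) (PySem.Set.add vis s) (by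
          intro u hu
          rcases List.mem_append.mp hu with h | h
          · exact (PySem.Set.mem_add _ _ _).mpr (Or.inl (hc u h))
          · simp at h; subst h; exact (PySem.Set.mem_add _ _ _).mpr (Or.inr rfl))
        have hfilt : rest.filter (fun t => !(PySem.Set.contains (PySem.Set.add vis s) t) && decide (Kfun d t = kr))
            = rest.filter (fun t => !(PySem.Set.contains vis t) && decide (Kfun d t = kr)) := by
          apply List.filter_congr
          intro t ht
          have hts : t ≠ s := fun h => hs (h ▸ ht)
          have hcont : PySem.Set.contains (PySem.Set.add vis s) t = PySem.Set.contains vis t := by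
            by_cases h : t ∈ vis
            · rw [(PySem.Set.contains_iff _ _).mpr h,
                  (PySem.Set.contains_iff _ _).mpr ((PySem.Set.mem_add _ _ _).mpr (Or.inl h))]
            · have h1 : PySem.Set.contains vis t = false := by
                rw [← Bool.not_eq_true]; exact fun hh => h ((PySem.Set.contains_iff _ _).mp hh)
              have h2 : PySem.Set.contains (PySem.Set.add vis s) t = false := by
                rw [← Bool.not_eq_true]
                intro hh
                rcases (PySem.Set.mem_add _ _ _).mp ((PySem.Set.contains_iff _ _).mp hh) with h' | h'
                · exact h h'
                · exact hts h'
              rw [h1, h2]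
          rw [hcont]
        rw [hfilt] at h1
        refine ⟨by simpa using h1, fun t => ?_⟩
        rw [h2 t]
        constructor
        · rintro (h | ⟨h, hk⟩)
          · rcases (PySem.Set.mem_add _ _ _).mp h with h' | h'
            · exact Or.inl h'
            · exact Or.inr ⟨by simp [h'], by rw [h']; exact hkey⟩
          · exact Or.inr ⟨List.mem_cons_of_mem _ h, hk⟩
        · rintro (h | ⟨h, hk⟩)
          · exact Or.inl ((PySem.Set.mem_add _ _ _).mpr (Or.inl h))
          · rcases List.mem_cons.mp h with rfl | h
            · exact Or.inl ((PySem.Set.mem_add _ _ _).mpr (Or.inr rfl))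
            · exact Or.inr ⟨h, hk⟩
      · rw [if_neg (fun h => hkey ((htv s).mp h))]
        have hpred : (!(PySem.Set.contains vis s) && decide (Kfun d s = kr)) = false := by
          simp [hkey]
        rw [hpred]
        obtain ⟨h1, h2⟩ := ih hnd' cur vis hc
        refine ⟨by simpa using h1, fun t => ?_⟩
        rw [h2 t]
        constructor
        · rintro (h | ⟨h, hk⟩)
          · exact Or.inl h
          · exact Or.inr ⟨List.mem_cons_of_mem _ h, hk⟩
        · rintro (h | ⟨h, hk⟩)
          · exact Or.inl h
          · rcases List.mem_cons.mp h with rfl | h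
            · exact absurd hk hkey
            · exact Or.inr ⟨h, hk⟩

theorem discard_eq_filter (s : PySem.Set (Int × Int)) (x : Int × Int) :
    PySem.Set.discard s x = s.filter (fun y => !(y == x)) := by
  unfold PySem.Set.discard; rfl

-- dedup/filter bookkeeping for one processed key
theorem filter_dedup_step (x : Int × Int) (xs P : List (Int × Int)) :
    (PySem.List.dedup (x :: xs)).filter (fun k => !decide (k ∈ P)) =
    (if x ∈ P then [] else [x]) ++
      (PySem.List.dedup xs).filter (fun k => !decide (k ∈ P ++ [x])) := by
  rw [PySem.List.dedup_eq_ofList, PySem.List.dedup_eq_ofList, PySem.Set.ofList_cons,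
      discard_eq_filter, List.filter_cons, List.filter_filter]
  have hcong : (PySem.Set.ofList xs).filter (fun k => !decide (k ∈ P) && !(k == x))
      = (PySem.Set.ofList xs).filter (fun k => !decide (k ∈ P ++ [x])) := by
    apply List.filter_congr
    intro k _
    by_cases h1 : k ∈ P <;> by_cases h2 : k = x <;> simp [h1, h2]
  rw [hcong]
  by_cases hx : x ∈ P
  · simp [hx]
  · simp [hx]

theorem outer_run (d : PySem.Dict String (List Int)) (hnd : d.keys.Nodup) :
    ∀ (rest p : List String), d.keys = p ++ rest →
    ∀ (visited : PySem.Set String) (out : List (List String)),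
    (∀ s ∈ d.keys, (s ∈ visited ↔ Kfun d s ∈ p.map (Kfun d))) →
    (rest.foldl (outerStep d) (visited, out)).2
      = out ++ ((PySem.List.dedup (rest.map (Kfun d))).filter
            (fun k => !decide (k ∈ p.map (Kfun d)))).flatMap
          (fun k => pairsSpec (d.keys.filter (fun s => decide (Kfun d s = k)))) := by
  intro rest
  induction rest with
  | nil =>
    intro p hsplit visited out hinv
    simp
  | cons r rest' ih =>
    intro p hsplit visited out hinv
    have hr : r ∈ d.keys := by rw [hsplit]; simp
    simp only [List.foldl_cons, List.map_cons]
    by_cases hv : r ∈ visited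
    · -- r already visited: the step emits nothing
      have step : outerStep d (visited, out) r = (visited, out) := by
        simp only [outerStep]
        rw [show PySem.Set.contains visited r = true from (PySem.Set.contains_iff _ _).mpr hv]
        simp [pyFindPairwise_eq, pairsSpec]
      rw [step]
      have hKrP : Kfun d r ∈ p.map (Kfun d) := (hinv r hr).mp hv
      have hinv' : ∀ s ∈ d.keys, (s ∈ visited ↔ Kfun d s ∈ (p ++ [r]).map (Kfun d)) := by
        intro s hsk
        rw [hinv s hsk]
        simp only [List.map_append, List.map_cons, List.map_nil, List.mem_append,
          List.mem_cons, List.not_mem_nil, or_false]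
        constructor
        · exact Or.inl
        · rintro (h | h)
          · exact h
          · rw [h]; exact hKrP
      rw [ih (p ++ [r]) (by rw [hsplit]; simp) visited out hinv']
      congr 1
      rw [filter_dedup_step]
      simp [hKrP]
    · -- r unvisited: its whole parallel group is collected and emitted
      have hcond : PySem.Set.contains visited r = false := by
        rw [← Bool.not_eq_true]
        exact fun hh => hv ((PySem.Set.contains_iff _ _).mp hh)
      have htv : ∀ s : String,
          PySem.Set.equal (tvOf d r) (PySem.Set.ofList
            [PySem.List.pyGetD (d.getD s []) 0 0, PySem.List.pyGetD (d.getD s []) 1 0]) = true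
          ↔ Kfun d s = Kfun d r := by
        intro s
        rw [tvOf, set2_eq]
        unfold Kfun keyOf
        exact eq_comm
      obtain ⟨h1, h2⟩ := inner_scan d (tvOf d r) (Kfun d r) htv d.keys hnd ([] ++ [r])
        (PySem.Set.add visited r) (by
          intro u hu
          simp only [List.nil_append, List.mem_singleton] at hu
          subst hu
          exact (PySem.Set.mem_add _ _ _).mpr (Or.inr rfl))
      have step : outerStep d (visited, out) r
          = ((d.keys.foldl (innerStep d (tvOf d r)) ([] ++ [r], PySem.Set.add visited r)).2,
             pyFindPairwise
               (d.keys.foldl (innerStep d (tvOf d r)) ([] ++ [r], PySem.Set.add visited r)).1 out) := by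
        simp only [outerStep]
        rw [hcond]
        simp
      rw [step]
      have hKrP : Kfun d r ∉ p.map (Kfun d) := fun h => hv ((hinv r hr).mpr h)
      -- the collected group is exactly all resistors sharing r's node pair
      have hrrest0 : r ∉ rest' := by
        have h2 := (List.nodup_append.mp (hsplit ▸ hnd)).2.1
        exact (List.nodup_cons.mp h2).1
      have hb : ([] ++ [r]) ++ d.keys.filter
            (fun s => !(PySem.Set.contains (PySem.Set.add visited r) s)
                      && decide (Kfun d s = Kfun d r))
          = d.keys.filter (fun s => decide (Kfun d s = Kfun d r)) := by
        have hrrest : r ∉ rest' := hrrest0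
        rw [hsplit, List.filter_append, List.filter_append, List.filter_cons, List.filter_cons]
        have hp1 : p.filter (fun s => !(PySem.Set.contains (PySem.Set.add visited r) s)
            && decide (Kfun d s = Kfun d r)) = [] := by
          rw [List.filter_eq_nil_iff]
          intro s hs
          by_cases hk : Kfun d s = Kfun d r
          · exact absurd (hk ▸ List.mem_map_of_mem hs) hKrP
          · simp [hk]
        have hp2 : p.filter (fun s => decide (Kfun d s = Kfun d r)) = [] := by
          rw [List.filter_eq_nil_iff]
          intro s hs
          by_cases hk : Kfun d s = Kfun d r
          · exact absurd (hk ▸ List.mem_map_of_mem hs) hKrP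
          · simp [hk]
        have hhead1 : (!(PySem.Set.contains (PySem.Set.add visited r) r)
            && decide (Kfun d r = Kfun d r)) = false := by
          rw [show PySem.Set.contains (PySem.Set.add visited r) r = true from
            (PySem.Set.contains_iff _ _).mpr ((PySem.Set.mem_add _ _ _).mpr (Or.inr rfl))]
          simp
        have hhead2 : (decide (Kfun d r = Kfun d r)) = true := by simp
        rw [hp1, hp2, hhead1, hhead2]
        simp only [Bool.false_eq_true, if_false, if_true]
        have hrest : rest'.filter (fun s => !(PySem.Set.contains (PySem.Set.add visited r) s)
              && decide (Kfun d s = Kfun d r))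
            = rest'.filter (fun s => decide (Kfun d s = Kfun d r)) := by
          apply List.filter_congr
          intro s hsr
          have hsk : s ∈ d.keys := by rw [hsplit]; simp [hsr]
          have hsnr : s ≠ r := fun h => hrrest (h ▸ hsr)
          by_cases hk : Kfun d s = Kfun d r
          · have hsv : s ∉ visited := fun h => hKrP (hk ▸ (hinv s hsk).mp h)
            have : PySem.Set.contains (PySem.Set.add visited r) s = false := by
              rw [← Bool.not_eq_true]
              intro hh
              rcases (PySem.Set.mem_add _ _ _).mp ((PySem.Set.contains_iff _ _).mp hh) with h' | h'
              · exact hsv h'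
              · exact hsnr h'
            simp [hk]
            exact ⟨hsv, hsnr⟩
          · simp [hk]
        rw [hrest]
        simp
      rw [h1, hb, pyFindPairwise_eq]
      have hinv' : ∀ s ∈ d.keys,
          (s ∈ (d.keys.foldl (innerStep d (tvOf d r)) ([] ++ [r], PySem.Set.add visited r)).2
            ↔ Kfun d s ∈ (p ++ [r]).map (Kfun d)) := by
        intro s hsk
        rw [h2 s]
        simp only [List.map_append, List.map_cons, List.map_nil, List.mem_append,
          List.mem_cons, List.not_mem_nil, or_false]
        constructor
        · rintro (h | ⟨_, hk⟩)
          · rcases (PySem.Set.mem_add _ _ _).mp h with h' | h'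
            · exact Or.inl ((hinv s hsk).mp h')
            · exact Or.inr (by rw [h'])
          · exact Or.inr hk
        · rintro (h | h)
          · exact Or.inl ((PySem.Set.mem_add _ _ _).mpr (Or.inl ((hinv s hsk).mpr h)))
          · exact Or.inr ⟨hsk, h⟩
      rw [ih (p ++ [r]) (by rw [hsplit]; simp)
        (d.keys.foldl (innerStep d (tvOf d r)) ([] ++ [r], PySem.Set.add visited r)).2
        (out ++ pairsSpec (d.keys.filter (fun s => decide (Kfun d s = Kfun d r)))) hinv']
      rw [filter_dedup_step]
      simp only [hKrP, if_false]
      simp [List.append_assoc]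

-- bridges from both programs' raw results to the common normal form specR

theorem keys_map_eq (d : PySem.Dict String (List Int)) (hnd : d.keys.Nodup) :
    d.keys.map (Kfun d) = d.items.map (fun p => keyOf p.2) := by
  have hkeys : d.keys = d.items.map (·.1) := by simp only [PySem.Dict.keys]
  rw [hkeys, List.map_map]
  apply List.map_congr_left
  intro p hp
  simp only [Function.comp_apply, Kfun]
  have hg : d.getD p.1 [] = p.2 := PySem.Dict.getD_of_mem_items d (by simpa using hp) hnd []
  simp only [hg]

theorem bucket_eq (d : PySem.Dict String (List Int)) (hnd : d.keys.Nodup) (k : Int × Int) :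
    d.keys.filter (fun s => decide (Kfun d s = k))
      = (d.items.filter (fun p => keyOf p.2 == k)).map (·.1) := by
  have hkeys : d.keys = d.items.map (·.1) := by simp only [PySem.Dict.keys]
  rw [hkeys, List.filter_map]
  congr 1
  apply List.filter_congr
  intro p hp
  simp only [Function.comp_apply, Kfun]
  have hg : d.getD p.1 [] = p.2 := PySem.Dict.getD_of_mem_items d (by simpa using hp) hnd []
  simp only [hg]
  by_cases h : keyOf p.2 = k <;> simp [h]

theorem A_eq (g : List (String × List Int)) :
    find_parallel g = specR (PySem.Dict.ofList g) := by
  have hd : find_parallel g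
      = ((PySem.Dict.ofList g).keys.foldl
          (outerStep (PySem.Dict.ofList g)) (PySem.Set.empty, [])).2 := rfl
  rw [hd, outer_run (PySem.Dict.ofList g) (PySem.Dict.nodup_keys_ofList g)
        (PySem.Dict.ofList g).keys [] rfl PySem.Set.empty []
        (by intro s _; simp [PySem.Set.empty])]
  simp only [List.map_nil, List.not_mem_nil, decide_false, Bool.not_false, List.filter_true,
    List.nil_append]
  rw [keys_map_eq _ (PySem.Dict.nodup_keys_ofList g)]
  simp only [bucket_eq _ (PySem.Dict.nodup_keys_ofList g)]
  rfl

theorem flat2 (x : String) : ∀ (t : List String) (o : List (List String)),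
    t.foldl (fun o3 y => o3 ++ [[x, y]] ++ [[y, x]]) o = o ++ t.flatMap (fun y => [[x, y], [y, x]]) := by
  intro t
  induction t with
  | nil => intro o; simp
  | cons y t ih =>
    intro o
    simp only [List.foldl_cons, List.flatMap_cons]
    rw [ih]
    simp

theorem enum_fold (group : List String) :
    ∀ (t : List String) (k : Nat) (out : List (List String)), group.drop k = t →
    (PySem.List.enumerate t (k : Int)).foldl (fun out2 ix =>
      (PySem.List.slice group (some (ix.1 + 1)) none).foldl (fun out3 y =>
        out3 ++ [[ix.2, y]] ++ [[y, ix.2]]) out2) out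
    = out ++ pairsSpec t := by
  intro t
  induction t with
  | nil => intro k out _; simp [PySem.List.enumerate, pairsSpec]
  | cons x t' ih =>
    intro k out h
    have hdrop : group.drop (k + 1) = t' := by
      rw [← List.drop_drop (i := 1) (j := k), h]; rfl
    rw [PySem.List.enumerate_cons]
    simp only [List.foldl_cons]
    have hslice : PySem.List.slice group (some ((k : Int) + 1)) none = t' := by
      have : ((k : Int) + 1) = ((k + 1 : Nat) : Int) := by push_cast; ring
      rw [this, PySem.List.slice_from_natCast, hdrop]
    rw [hslice, flat2]
    have := ih (k + 1) (out ++ t'.flatMap (fun y => [[x, y], [y, x]])) hdrop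
    push_cast at this
    rw [this]
    simp [pairsSpec]

theorem groups_fold : ∀ (gs : List (List String)) (out : List (List String)),
    gs.foldl (fun out group =>
      (PySem.List.enumerate group).foldl (fun out2 ix =>
        (PySem.List.slice group (some (ix.1 + 1)) none).foldl (fun out3 y =>
          out3 ++ [[ix.2, y]] ++ [[y, ix.2]]) out2) out) out
    = out ++ gs.flatMap pairsSpec := by
  intro gs
  induction gs with
  | nil => intro out; simp
  | cons g gs ih =>
    intro out
    simp only [List.foldl_cons, List.flatMap_cons]
    rw [show PySem.List.enumerate g = PySem.List.enumerate g ((0 : Nat) : Int) from rfl,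
        enum_fold g g 0 out (by simp), ih]
    simp

theorem B_eq (g : List (String × List Int)) :
    find_parallel_alt g = specR (PySem.Dict.ofList g) := by
  simp only [find_parallel_alt]
  rw [PySem.List.foldl_append_singleton_eq_map]
  simp only [List.nil_append]
  rw [groups_fold]
  simp only [List.nil_append]
  have hnodup : ((((PySem.Dict.ofList g).items.map
      (fun p => ((min (PySem.List.pyGetD p.2 0 0) (PySem.List.pyGetD p.2 1 0),
                  max (PySem.List.pyGetD p.2 0 0) (PySem.List.pyGetD p.2 1 0)), p.1))).foldl
      (fun bk q => bk.modify q.1 [] (· ++ [q.2])) PySem.Dict.empty).keys).Nodup := by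
    apply PySem.Dict.nodup_keys_foldl_modify_key
    exact PySem.Dict.nodup_keys_empty
  rw [PySem.Dict.values_eq_map_keys _ hnodup []]
  rw [PySem.Dict.keys_foldl_modify_key]
  simp only [PySem.Dict.keys_empty, PySem.Set.update_nil_left, List.map_map]
  simp only [PySem.Dict.getD_foldl_modify_append, PySem.Dict.getD_empty, List.nil_append]
  rw [List.flatMap_map]
  simp only [specR, List.filter_map, List.map_map]
  rw [← PySem.List.dedup_eq_ofList]
  rfl

-- ===== VERDICT (by name: the statement is the Claim_ definition above) =====
theorem find_parallel_spec : Claim_equal_find_parallel := by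
  intro graph _ _
  unfold Spec_find_parallel
  exact (A_eq graph).trans (B_eq graph).symm
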